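-- pv_equiv track=rewrite | github.com/mdrihan78/sliding-puzzle-with-Solver-IDA- | backend-python/solver.py | linear_conflict
-- ===== SOURCE A (Python) =====
-- def manhattan(board, size):
--     dist = 0
--     for idx, val in enumerate(board):
--         if val is None: continue
--         goal_idx = val-1
--         cur_r, cur_c = divmod(idx, size)
--         goal_r, goal_c = divmod(goal_idx, size)
--         dist += abs(cur_r-goal_r) + abs(cur_c-goal_c)
--     return dist
--
-- def linear_conflict(board, size):
--     # Manhattan + Linear Conflict
--     lc = 0
--     for row in range(size):
--         max_seen = -1
--         for col in range(size):
--             idx = row*size + col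
--             val = board[idx]
--             if val is None: continue
--             goal_row = (val-1)//size
--             if goal_row == row:
--                 if val > max_seen:
--                     max_seen = val
--                 else:
--                     lc += 2
--     for col in range(size):
--         max_seen = -1
--         for row in range(size):
--             idx = row*size + col
--             val = board[idx]
--             if val is None: continue
--             goal_col = (val-1)%size
--             if goal_col == col:
--                 if val > max_seen:
--                     max_seen = val
--                 else:
--                     lc += 2
--     return manhattan(board, size) + lc
-- ===== SOURCE B (Python) =====
-- def linear_conflict(board, size):
--     # Manhattan distance over the board, then both linear-conflict counts in a
--     # single row-major sweep of the grid: a per-row running max plus an array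
--     # of per-column maxima that persists across rows.
--     dist = 0
--     for idx, val in enumerate(board):
--         if val is None:
--             continue
--         cur_r, cur_c = divmod(idx, size)
--         goal_r, goal_c = divmod(val - 1, size)
--         dist += abs(cur_r - goal_r) + abs(cur_c - goal_c)
--
--     lc = 0
--     col_max = [-1] * size
--     for row in range(size):
--         row_max = -1
--         for col in range(size):
--             val = board[row * size + col]
--             if val is None:
--                 continue
--             goal_row, goal_col = divmod(val - 1, size)
--             if goal_row == row:
--                 if val > row_max:
--                     row_max = val
--                 else:
--                     lc += 2
--             if goal_col == col:
--                 if val > col_max[col]: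
--                     col_max[col] = val
--                 else:
--                     lc += 2
--     return dist + lc
-- ===== Notes on version B (the rewrite author's own statement) =====
-- stated objective: alternative
-- what changed: B computes both linear-conflict counts in one row-major sweep of the grid that maintains a per-column maxima array alongside the per-row running max (A uses a separate manhattan helper plus two independent row-scan and column-scan double loops); Pre_ excludes only inputs where A raises (board shorter than size*size for positive size: IndexError; size=0 with a non-None cell: ZeroDivisionError).
import Mathlib
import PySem

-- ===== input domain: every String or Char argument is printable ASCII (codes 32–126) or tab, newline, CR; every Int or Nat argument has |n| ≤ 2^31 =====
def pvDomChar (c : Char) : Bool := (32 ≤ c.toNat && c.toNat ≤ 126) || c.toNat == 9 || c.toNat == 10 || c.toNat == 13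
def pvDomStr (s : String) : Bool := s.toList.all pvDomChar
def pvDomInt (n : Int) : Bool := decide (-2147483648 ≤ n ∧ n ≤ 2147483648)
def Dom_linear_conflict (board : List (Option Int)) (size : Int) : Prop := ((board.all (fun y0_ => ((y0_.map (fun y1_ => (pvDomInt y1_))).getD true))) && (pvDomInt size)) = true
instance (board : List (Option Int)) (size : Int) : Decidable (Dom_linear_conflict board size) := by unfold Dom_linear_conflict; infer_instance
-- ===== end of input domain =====

-- B computes both linear-conflict counts in one row-major sweep of the grid
-- (per-column maxima array beside the per-row running max) instead of A's two
-- separate row/column double scans (objective: alternative decomposition, same cost).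

-- ===== PORT A =====
def manhattan (board : List (Option Int)) (size : Int) : Int :=
  (PySem.List.enumerate board).foldl
    (fun dist iv =>
      match iv.2 with
      | none => dist
      | some val =>
        let cur := (PySem.Int.divmod? iv.1 size).getD (0, 0)
        let goal := (PySem.Int.divmod? (val - 1) size).getD (0, 0)
        dist + |cur.1 - goal.1| + |cur.2 - goal.2|) 0

def linear_conflict (board : List (Option Int)) (size : Int) : Int :=
  -- lc after the row pass (Python's first double loop, lc starting at 0) is the
  -- seed of the column pass below; manhattan is added at the return.
  manhattan board size +
    (PySem.List.pyRange 0 size 1).foldl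
      (fun lc col =>
        ((PySem.List.pyRange 0 size 1).foldl
            (fun (p : Int × Int) row =>
              match PySem.List.pyGet? board (row * size + col) with
              | none => p          -- IndexError: outside Pre_
              | some none => p
              | some (some val) =>
                if PySem.Int.mod (val - 1) size = col then
                  if val > p.2 then (p.1, val) else (p.1 + 2, p.2)
                else p)
            (lc, -1)).1)
      ((PySem.List.pyRange 0 size 1).foldl
        (fun lc row =>
          ((PySem.List.pyRange 0 size 1).foldl
              (fun (p : Int × Int) col =>
                match PySem.List.pyGet? board (row * size + col) with
                | none => p          -- IndexError: outside Pre_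
                | some none => p
                | some (some val) =>
                  if PySem.Int.floordiv (val - 1) size = row then
                    if val > p.2 then (p.1, val) else (p.1 + 2, p.2)
                  else p)
              (lc, -1)).1)
        0)

-- ===== PORT B =====
def linear_conflict_alt (board : List (Option Int)) (size : Int) : Int :=
  let dist : Int := (PySem.List.enumerate board).foldl
    (fun dist iv =>
      match iv.2 with
      | none => dist
      | some val =>
        let cur := (PySem.Int.divmod? iv.1 size).getD (0, 0)
        let goal := (PySem.Int.divmod? (val - 1) size).getD (0, 0)
        dist + |cur.1 - goal.1| + |cur.2 - goal.2|) 0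
  -- single sweep: state = (lc, col_max); inner state = (lc, row_max, col_max)
  let res := (PySem.List.pyRange 0 size 1).foldl
    (fun (st : Int × List Int) row =>
      let t := (PySem.List.pyRange 0 size 1).foldl
        (fun (p : Int × Int × List Int) col =>
          match PySem.List.pyGet? board (row * size + col) with
          | none => p            -- IndexError: outside Pre_
          | some none => p
          | some (some val) =>
            let goal := (PySem.Int.divmod? (val - 1) size).getD (0, 0)
            let p1 : Int × Int :=
              if goal.1 = row then
                if val > p.2.1 then (p.1, val) else (p.1 + 2, p.2.1)
              else (p.1, p.2.1)
            let p2 : Int × List Int :=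
              if goal.2 = col then
                if val > PySem.List.pyGetD p.2.2 col (-1) then
                  (p1.1, PySem.List.pySetD p.2.2 col val)
                else (p1.1 + 2, p.2.2)
              else (p1.1, p.2.2)
            (p2.1, p1.2, p2.2))
        (st.1, -1, st.2)
      (t.1, t.2.2))
    ((0 : Int), List.replicate size.toNat (-1 : Int))
  dist + res.1

-- ===== PRECONDITION & SPEC =====
-- Pre_ excludes exactly the inputs where A raises: board[idx] out of range
-- (IndexError when size*size > len(board) for positive size) and
-- divmod(·, 0) (ZeroDivisionError when size = 0 and some cell holds a value).
def Pre_linear_conflict (board : List (Option Int)) (size : Int) : Prop :=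
  (size = 0 → ∀ v ∈ board, v = none) ∧ (0 < size → size * size ≤ (board.length : Int))
instance (board : List (Option Int)) (size : Int) : Decidable (Pre_linear_conflict board size) := by
  unfold Pre_linear_conflict; infer_instance

def pvWitness_linear_conflict : List (Option Int) × Int := ([some 2, some 1, some 3, none], 2)

def Spec_linear_conflict (board : List (Option Int)) (size : Int) (out : Int) : Prop := out = linear_conflict_alt board size
instance (board : List (Option Int)) (size : Int) (out : Int) : Decidable (Spec_linear_conflict board size out) := by unfold Spec_linear_conflict; infer_instance

-- ===== CLAIM (what is proved, stated in full; the proofs are below) =====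
def Claim_equal_linear_conflict : Prop := ∀ (board : List (Option Int)) (size : Int), Dom_linear_conflict board size → Pre_linear_conflict board size → Spec_linear_conflict board size (linear_conflict board size)

-- ===== LEMMAS AND PROOFS =====

-- the linear-conflict accumulator step shared by both programs
def pvLcStep (p : Int × Int) (v : Int) : Int × Int :=
  if v > p.2 then (p.1, v) else (p.1 + 2, p.2)

def pvF (l : List Int) : Int := (l.foldl pvLcStep (0, -1)).1
def pvG (l : List Int) : Int := (l.foldl pvLcStep (0, -1)).2

-- selected in-goal-line values
def pvRowSel (b : List (Option Int)) (s : Int) (r c : Nat) : Option Int :=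
  match b.getD (r * s.toNat + c) none with
  | none => none
  | some v => if PySem.Int.floordiv (v - 1) s = (r : Int) then some v else none

def pvColSel (b : List (Option Int)) (s : Int) (c r : Nat) : Option Int :=
  match b.getD (r * s.toNat + c) none with
  | none => none
  | some v => if PySem.Int.mod (v - 1) s = (c : Int) then some v else none

def pvRowList (b : List (Option Int)) (s : Int) (r c : Nat) : List Int :=
  (List.range c).filterMap (pvRowSel b s r)

def pvColList (b : List (Option Int)) (s : Int) (c r : Nat) : List Int :=
  (List.range r).filterMap (pvColSel b s c)

-- column one-cell update: (+2 or 0, new column max)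
def pvColUpd (b : List (Option Int)) (s : Int) (m : Int) (r c : Nat) : Int × Int :=
  match pvColSel b s c r with
  | none => (0, m)
  | some v => if v > m then (0, v) else (2, m)

-- named copy of port B's inner loop body (definitionally the port's lambda)
def pvIn (b : List (Option Int)) (s : Int) (row : Int)
    (p : Int × Int × List Int) (col : Int) : Int × Int × List Int :=
  match PySem.List.pyGet? b (row * s + col) with
  | none => p
  | some none => p
  | some (some val) =>
    let goal := (PySem.Int.divmod? (val - 1) s).getD (0, 0)
    let p1 : Int × Int :=
      if goal.1 = row then
        if val > p.2.1 then (p.1, val) else (p.1 + 2, p.2.1)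
      else (p.1, p.2.1)
    let p2 : Int × List Int :=
      if goal.2 = col then
        if val > PySem.List.pyGetD p.2.2 col (-1) then
          (p1.1, PySem.List.pySetD p.2.2 col val)
        else (p1.1 + 2, p.2.2)
      else (p1.1, p.2.2)
    (p2.1, p1.2, p2.2)

-- named copy of port B's outer loop body
def pvOut (b : List (Option Int)) (s : Int) (st : Int × List Int) (row : Int) : Int × List Int :=
  let t := (PySem.List.pyRange 0 s 1).foldl (pvIn b s row) (st.1, -1, st.2)
  (t.1, t.2.2)

lemma pv_lcStep_add (l : List Int) (a m : Int) :
    l.foldl pvLcStep (a, m) = (a + (l.foldl pvLcStep (0, m)).1, (l.foldl pvLcStep (0, m)).2) := by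
  induction l generalizing a m with
  | nil => simp
  | cons v l ih =>
    simp only [List.foldl_cons, pvLcStep]
    split_ifs with h
    · exact ih a v
    · simp only [ih (a + 2) m, ih (0 + 2) m, Prod.mk.injEq]
      exact ⟨by ring, trivial⟩

lemma pv_FG_append (l : List Int) (v : Int) :
    pvF (l ++ [v]) = pvF l + (if v > pvG l then 0 else 2) ∧
    pvG (l ++ [v]) = (if v > pvG l then v else pvG l) := by
  unfold pvF pvG
  simp only [List.foldl_append, List.foldl_cons, List.foldl_nil]
  rcases hP : l.foldl pvLcStep (0, -1) with ⟨F, G⟩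
  simp only [pvLcStep]
  split_ifs <;> simp

lemma pv_foldl_filterMap {α : Type} (l : List α) (g : α → Option Int) (p : Int × Int) :
    l.foldl (fun p x => match g x with | none => p | some v => pvLcStep p v) p
      = (l.filterMap g).foldl pvLcStep p := by
  induction l generalizing p with
  | nil => simp
  | cons x l ih =>
    cases hg : g x <;> simp [hg, ih]

lemma pv_idx_lt (n r c : Nat) (hr : r < n) (hc : c < n) : r * n + c < n * n := by
  calc r * n + c < r * n + n := by omega
    _ = (r + 1) * n := by ring
    _ ≤ n * n := Nat.mul_le_mul_right _ (by omega)

-- A's inner row scan = linear-conflict fold over the selected values of the row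
lemma pv_A_row_inner (b : List (Option Int)) (s : Int) (hs : 0 < s)
    (hlen : s.toNat * s.toNat ≤ b.length) (r : Nat) (hr : r < s.toNat) (lc : Int) :
    (((List.range s.toNat).map (fun k => ((k : Nat) : Int))).foldl
        (fun (p : Int × Int) col =>
          match PySem.List.pyGet? b ((r : Int) * s + col) with
          | none => p
          | some none => p
          | some (some val) =>
            if PySem.Int.floordiv (val - 1) s = (r : Int) then
              if val > p.2 then (p.1, val) else (p.1 + 2, p.2)
            else p)
        (lc, -1)).1 = lc + pvF (pvRowList b s r s.toNat) := by
  have hsn : (s.toNat : Int) = s := Int.toNat_of_nonneg hs.le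
  rw [List.foldl_map]
  rw [PySem.List.foldl_congr_mem _ _
      (fun (p : Int × Int) (c : Nat) =>
        match pvRowSel b s r c with | none => p | some v => pvLcStep p v) _ ?_]
  · rw [pv_foldl_filterMap, pv_lcStep_add]
    rfl
  · intro p c hc
    simp only [List.mem_range] at hc
    have hidx : (r : Int) * s + (c : Int) = ((r * s.toNat + c : Nat) : Int) := by
      push_cast
      rw [hsn]
    rw [hidx, PySem.List.pyGet?_natCast]
    have hlt : r * s.toNat + c < b.length :=
      Nat.lt_of_lt_of_le (pv_idx_lt _ _ _ hr hc) hlen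
    rw [List.getElem?_eq_getElem hlt]
    simp only [pvRowSel, List.getD_eq_getElem b none hlt]
    cases b[r * s.toNat + c] with
    | none => rfl
    | some v =>
      by_cases hgr : PySem.Int.floordiv (v - 1) s = (r : Int) <;> simp [hgr, pvLcStep]

-- A's inner column scan = linear-conflict fold over the selected values of the column
lemma pv_A_col_inner (b : List (Option Int)) (s : Int) (hs : 0 < s)
    (hlen : s.toNat * s.toNat ≤ b.length) (c : Nat) (hc : c < s.toNat) (lc : Int) :
    (((List.range s.toNat).map (fun k => ((k : Nat) : Int))).foldl
        (fun (p : Int × Int) row =>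
          match PySem.List.pyGet? b (row * s + (c : Int)) with
          | none => p
          | some none => p
          | some (some val) =>
            if PySem.Int.mod (val - 1) s = (c : Int) then
              if val > p.2 then (p.1, val) else (p.1 + 2, p.2)
            else p)
        (lc, -1)).1 = lc + pvF (pvColList b s c s.toNat) := by
  have hsn : (s.toNat : Int) = s := Int.toNat_of_nonneg hs.le
  rw [List.foldl_map]
  rw [PySem.List.foldl_congr_mem _ _
      (fun (p : Int × Int) (r : Nat) =>
        match pvColSel b s c r with | none => p | some v => pvLcStep p v) _ ?_]
  · rw [pv_foldl_filterMap, pv_lcStep_add]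
    rfl
  · intro p r hr
    simp only [List.mem_range] at hr
    have hidx : (r : Int) * s + (c : Int) = ((r * s.toNat + c : Nat) : Int) := by
      push_cast
      rw [hsn]
    rw [hidx, PySem.List.pyGet?_natCast]
    have hlt : r * s.toNat + c < b.length :=
      Nat.lt_of_lt_of_le (pv_idx_lt _ _ _ hr hc) hlen
    rw [List.getElem?_eq_getElem hlt]
    simp only [pvColSel, List.getD_eq_getElem b none hlt]
    cases b[r * s.toNat + c] with
    | none => rfl
    | some v =>
      by_cases hgc : PySem.Int.mod (v - 1) s = (c : Int) <;> simp [hgc, pvLcStep]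

-- A's first double loop
lemma pv_A_rows (b : List (Option Int)) (s : Int) (hs : 0 < s)
    (hlen : s.toNat * s.toNat ≤ b.length) (lc0 : Int) :
    (PySem.List.pyRange 0 s 1).foldl
      (fun lc row =>
        ((PySem.List.pyRange 0 s 1).foldl
            (fun (p : Int × Int) col =>
              match PySem.List.pyGet? b (row * s + col) with
              | none => p
              | some none => p
              | some (some val) =>
                if PySem.Int.floordiv (val - 1) s = row then
                  if val > p.2 then (p.1, val) else (p.1 + 2, p.2)
                else p)
            (lc, -1)).1)
      lc0
    = lc0 + ((List.range s.toNat).map (fun r => pvF (pvRowList b s r s.toNat))).sum := by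
  conv_lhs => rw [PySem.List.pyRange_one 0 s]
  simp only [sub_zero]
  rw [List.foldl_map]
  rw [PySem.List.foldl_congr_mem _ _
      (fun (lc : Int) (r : Nat) => lc + pvF (pvRowList b s r s.toNat)) _ ?_]
  · exact PySem.List.foldl_add _ _ _
  · intro lc r hr
    simp only [List.mem_range] at hr
    simp only [zero_add]
    exact pv_A_row_inner b s hs hlen r hr lc

-- A's second double loop
lemma pv_A_cols (b : List (Option Int)) (s : Int) (hs : 0 < s)
    (hlen : s.toNat * s.toNat ≤ b.length) (lc0 : Int) :
    (PySem.List.pyRange 0 s 1).foldl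
      (fun lc col =>
        ((PySem.List.pyRange 0 s 1).foldl
            (fun (p : Int × Int) row =>
              match PySem.List.pyGet? b (row * s + col) with
              | none => p
              | some none => p
              | some (some val) =>
                if PySem.Int.mod (val - 1) s = col then
                  if val > p.2 then (p.1, val) else (p.1 + 2, p.2)
                else p)
            (lc, -1)).1)
      lc0
    = lc0 + ((List.range s.toNat).map (fun c => pvF (pvColList b s c s.toNat))).sum := by
  conv_lhs => rw [PySem.List.pyRange_one 0 s]
  simp only [sub_zero]
  rw [List.foldl_map]
  rw [PySem.List.foldl_congr_mem _ _
      (fun (lc : Int) (c : Nat) => lc + pvF (pvColList b s c s.toNat)) _ ?_]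
  · exact PySem.List.foldl_add _ _ _
  · intro lc c hc
    simp only [List.mem_range] at hc
    simp only [zero_add]
    exact pv_A_col_inner b s hs hlen c hc lc

-- A, positive size: Manhattan plus per-row and per-column conflict counts
lemma pv_A_pos (b : List (Option Int)) (s : Int) (hs : 0 < s)
    (hlen : s.toNat * s.toNat ≤ b.length) :
    linear_conflict b s
      = manhattan b s
        + ((List.range s.toNat).map (fun r => pvF (pvRowList b s r s.toNat))).sum
        + ((List.range s.toNat).map (fun c => pvF (pvColList b s c s.toNat))).sum := by
  unfold linear_conflict
  rw [pv_A_rows b s hs hlen 0, pv_A_cols b s hs hlen _]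
  ring

-- appending one cell to a row / column selection
lemma pv_rowList_succ (b : List (Option Int)) (s : Int) (r c : Nat) :
    pvRowList b s r (c + 1) = pvRowList b s r c ++ (pvRowSel b s r c).toList := by
  unfold pvRowList
  rw [List.range_succ, List.filterMap_append]
  cases h : pvRowSel b s r c <;> simp [h]

lemma pv_colList_succ (b : List (Option Int)) (s : Int) (c r : Nat) :
    pvColList b s c (r + 1) = pvColList b s c r ++ (pvColSel b s c r).toList := by
  unfold pvColList
  rw [List.range_succ, List.filterMap_append]
  cases h : pvColSel b s c r <;> simp [h]

lemma pv_col_FG (b : List (Option Int)) (s : Int) (c r : Nat) :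
    pvF (pvColList b s c (r + 1))
        = pvF (pvColList b s c r) + (pvColUpd b s (pvG (pvColList b s c r)) r c).1 ∧
      pvG (pvColList b s c (r + 1)) = (pvColUpd b s (pvG (pvColList b s c r)) r c).2 := by
  rw [pv_colList_succ]
  cases h : pvColSel b s c r with
  | none => simp [pvColUpd, h]
  | some v =>
    have := pv_FG_append (pvColList b s c r) v
    simp only [Option.toList_some] at *
    rw [this.1, this.2]
    unfold pvColUpd
    rw [h]
    by_cases hv : pvG (pvColList b s c r) < v <;> simp [hv]

lemma pv_divmod_getD (a b : Int) (h : b ≠ 0) :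
    (PySem.Int.divmod? a b).getD (0, 0) = (PySem.Int.floordiv a b, PySem.Int.mod a b) := by
  simp [PySem.Int.divmod?, PySem.Int.floordiv, PySem.Int.mod, h]

lemma pv_set_map_range (n c : Nat) (f : Nat → Int) (v : Int) :
    ((List.range n).map f).set c v = (List.range n).map (fun c' => if c' = c then v else f c') := by
  apply List.ext_getElem <;> simp
  intro i hi
  rw [List.getElem_set]
  by_cases hic : c = i
  · simp [hic]
  · simp [hic]
    omega

lemma pv_map_noupdate (n c : Nat) (g : Nat → Int) :
    (List.range n).map (fun c' => if c' = c then g c else g c') = (List.range n).map g := by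
  apply List.map_congr_left
  intro c' _
  by_cases h : c' = c <;> simp [h]

-- one cell of B's sweep, inside the grid
lemma pv_in_cell (b : List (Option Int)) (n : Nat) (hn : 0 < n)
    (r c : Nat) (hr : r < n) (hc : c < n) (hlen : n * n ≤ b.length) (L RM : Int) (g : Nat → Int) :
    pvIn b (n : Int) (r : Int) (L, RM, (List.range n).map g) (c : Int)
      = (L + (match pvRowSel b (n : Int) r c with
              | none => 0
              | some v => if v > RM then 0 else 2)
           + (pvColUpd b (n : Int) (g c) r c).1,
         (match pvRowSel b (n : Int) r c with
          | none => RM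
          | some v => if v > RM then v else RM),
         (List.range n).map
           (fun c' => if c' = c then (pvColUpd b (n : Int) (g c) r c).2 else g c')) := by
  have hs : (0 : Int) < (n : Int) := by exact_mod_cast hn
  have hidx : (r : Int) * (n : Int) + (c : Int) = ((r * n + c : Nat) : Int) := by push_cast; ring
  have hlt : r * n + c < b.length := Nat.lt_of_lt_of_le (pv_idx_lt _ _ _ hr hc) hlen
  have htn : ((n : Int)).toNat = n := Int.toNat_natCast n
  unfold pvIn pvRowSel pvColUpd pvColSel
  rw [hidx, PySem.List.pyGet?_natCast, List.getElem?_eq_getElem hlt]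
  simp only [htn, List.getD_eq_getElem b none hlt, pv_divmod_getD _ (n : Int) (ne_of_gt hs)]
  cases hcell : b[r * n + c] with
  | none => simp [pv_map_noupdate]
  | some v =>
    by_cases hrowc : PySem.Int.floordiv (v - 1) (n : Int) = (r : Int) <;>
      by_cases hcolc : PySem.Int.mod (v - 1) (n : Int) = (c : Int) <;>
        simp only [hrowc, hcolc, if_pos, if_neg, not_false_iff]
    all_goals try rw [PySem.List.pyGetD_natCast, PySem.List.getD_map_range _ _ _ _ hc]
    all_goals try rw [PySem.List.pySetD_natCast, pv_set_map_range]
    all_goals simp only [Prod.mk.injEq]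
    all_goals try split_ifs
    all_goals (and_intros <;>
        first
          | trivial
          | rfl
          | ring
          | omega
          | (apply List.map_congr_left
             intro c' _
             by_cases h : c' = c <;> simp [h]))
    all_goals exact (pv_map_noupdate n c g).symm

-- one full row of B's sweep
lemma pv_B_row (b : List (Option Int)) (n : Nat) (hn : 0 < n)
    (hlen : n * n ≤ b.length) (r : Nat) (hr : r < n) :
    ∀ c, c ≤ n → ∀ (L : Int) (g : Nat → Int),
    (((List.range c).map (fun c' => ((c' : Nat) : Int))).foldl (pvIn b (n : Int) (r : Int))
        (L, -1, (List.range n).map g))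
      = (L + pvF (pvRowList b (n : Int) r c)
           + ((List.range c).map (fun c' => (pvColUpd b (n : Int) (g c') r c').1)).sum,
         pvG (pvRowList b (n : Int) r c),
         (List.range n).map
           (fun c' => if c' < c then (pvColUpd b (n : Int) (g c') r c').2 else g c')) := by
  intro c
  induction c with
  | zero =>
    intro _ L g
    simp [pvRowList, pvF, pvG]
  | succ c ih =>
    intro hc L g
    have hcn : c < n := by omega
    rw [List.range_succ, List.map_append, List.foldl_append, ih (by omega) L g]
    simp only [List.map_cons, List.map_nil, List.foldl_cons, List.foldl_nil,
      List.map_append, List.sum_append, List.sum_cons, List.sum_nil]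
    rw [pv_in_cell b n hn r c hr hcn hlen]
    have hcc : ¬ (c < c) := lt_irrefl c
    simp only [hcc, if_false]
    have hrsucc := pv_rowList_succ b (n : Int) r c
    simp only [Prod.mk.injEq]
    cases hsel : pvRowSel b (n : Int) r c with
    | none =>
      rw [hrsucc, hsel]
      simp only [Option.toList_none, List.append_nil]
      refine ⟨by ring, by trivial, ?_⟩
      apply List.map_congr_left
      intro c' _
      by_cases h1 : c' = c
      · subst h1
        simp
      · have h3 : (c' < c + 1) ↔ (c' < c) := by omega
        simp [h1, h3]
    | some v =>
      rw [hrsucc, hsel]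
      simp only [Option.toList_some]
      have hFG := pv_FG_append (pvRowList b (n : Int) r c) v
      rw [hFG.1, hFG.2]
      refine ⟨by ring, by trivial, ?_⟩
      apply List.map_congr_left
      intro c' _
      by_cases h1 : c' = c
      · subst h1
        simp
      · have h3 : (c' < c + 1) ↔ (c' < c) := by omega
        simp [h1, h3]

-- B's sweep over the first r complete rows
lemma pv_B_grid (b : List (Option Int)) (n : Nat) (hn : 0 < n) (hlen : n * n ≤ b.length) :
    ∀ r, r ≤ n →
    (((List.range r).map (fun r' => ((r' : Nat) : Int))).foldl (pvOut b (n : Int))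
        (0, List.replicate n (-1 : Int)))
      = (((List.range r).map (fun r' => pvF (pvRowList b (n : Int) r' n))).sum
           + ((List.range n).map (fun c => pvF (pvColList b (n : Int) c r))).sum,
         (List.range n).map (fun c => pvG (pvColList b (n : Int) c r))) := by
  intro r
  induction r with
  | zero =>
    intro _
    simp [pvColList, pvF, pvG, List.map_const']
  | succ r ih =>
    intro hr
    have hrn : r < n := by omega
    rw [List.range_succ, List.map_append, List.foldl_append, ih (by omega)]
    simp only [List.map_cons, List.map_nil, List.foldl_cons, List.foldl_nil, List.map_append,
      List.sum_append, List.sum_cons, List.sum_nil]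
    unfold pvOut
    conv_lhs => rw [PySem.List.pyRange_one 0 (n : Int)]
    simp only [sub_zero, Int.toNat_natCast, zero_add]
    rw [pv_B_row b n hn hlen r hrn n le_rfl]
    simp only [Prod.mk.injEq]
    constructor
    · have hcols : ((List.range n).map (fun c => pvF (pvColList b (n : Int) c (r + 1)))).sum
          = ((List.range n).map (fun c => pvF (pvColList b (n : Int) c r))).sum
            + ((List.range n).map
                (fun c => (pvColUpd b (n : Int) (pvG (pvColList b (n : Int) c r)) r c).1)).sum := by
        rw [← PySem.List.sum_map_add_int]
        apply congrArg
        apply List.map_congr_left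
        intro c _
        exact (pv_col_FG b (n : Int) c r).1
      rw [hcols]
      ring
    · apply List.map_congr_left
      intro c hc
      simp only [List.mem_range] at hc
      simp only [hc, if_pos]
      exact ((pv_col_FG b (n : Int) c r).2).symm

-- B, positive size: same decomposition as A
lemma pv_B_pos (b : List (Option Int)) (s : Int) (hs : 0 < s)
    (hlen : s.toNat * s.toNat ≤ b.length) :
    linear_conflict_alt b s
      = manhattan b s
        + ((List.range s.toNat).map (fun r => pvF (pvRowList b s r s.toNat))).sum
        + ((List.range s.toNat).map (fun c => pvF (pvColList b s c s.toNat))).sum := by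
  obtain ⟨n, rfl⟩ : ∃ n : Nat, s = ((n : Nat) : Int) := ⟨s.toNat, (Int.toNat_of_nonneg hs.le).symm⟩
  have hn : 0 < n := by exact_mod_cast hs
  simp only [Int.toNat_natCast] at hlen ⊢
  have h0 : linear_conflict_alt b (n : Int)
      = manhattan b (n : Int) +
        ((PySem.List.pyRange 0 (n : Int) 1).foldl (pvOut b (n : Int))
          (0, List.replicate n (-1))).1 := rfl
  rw [h0]
  conv_lhs => rw [PySem.List.pyRange_one 0 (n : Int)]
  simp only [sub_zero, Int.toNat_natCast, zero_add]
  rw [pv_B_grid b n hn hlen n le_rfl]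
  ring

-- ===== VERDICT (by name: the statement is the Claim_ definition above) =====
theorem linear_conflict_spec : Claim_equal_linear_conflict := by
  unfold Claim_equal_linear_conflict
  intro board size hdom hpre
  unfold Spec_linear_conflict
  by_cases hs : 0 < size
  · have hlen : size.toNat * size.toNat ≤ board.length := by
      have h1 := hpre.2 hs
      have hsn : ((size.toNat : Nat) : Int) = size := Int.toNat_of_nonneg hs.le
      have h2 : ((size.toNat * size.toNat : Nat) : Int) ≤ (board.length : Int) := by
        push_cast
        rw [hsn]
        exact h1
      exact_mod_cast h2
    rw [pv_A_pos board size hs hlen, pv_B_pos board size hs hlen]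
  · have hnil : PySem.List.pyRange 0 size 1 = [] := PySem.List.pyRange_one_eq_nil (by omega)
    have hA : linear_conflict board size = manhattan board size + 0 := by
      unfold linear_conflict
      rw [hnil]
      simp
    have hB : linear_conflict_alt board size = manhattan board size + 0 := by
      have h0 : linear_conflict_alt board size
          = manhattan board size +
            ((PySem.List.pyRange 0 size 1).foldl (pvOut board size)
              (0, List.replicate size.toNat (-1))).1 := rfl
      rw [h0, hnil]
      simp
    rw [hA, hB]
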